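-- pv_equiv track=rewrite | github.com/szhx/Python | University projects/a07/a07q1.py | fn_a
-- ===== SOURCE A (Python) =====
-- def fn_a(L):
--     def helper(M, m):
--         n = 0
--         for x in M:
--             if x == m:
--                 n = n + 1
--         return n
--     L1 = list(filter(lambda x: x > helper(L, x), L))
--     return len(L1)
-- ===== SOURCE B (Python) =====
-- def fn_a(L):
--     counts = {}
--     for x in L:
--         counts[x] = counts.get(x, 0) + 1
--     return sum(c for v, c in counts.items() if v > c)
-- ===== Notes on version B (the rewrite author's own statement) =====
-- stated objective: faster
-- what changed: B builds a frequency dictionary in one pass and sums the counts of values exceeding their own frequency, replacing A's per-element rescans of the whole list.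
import Mathlib
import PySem

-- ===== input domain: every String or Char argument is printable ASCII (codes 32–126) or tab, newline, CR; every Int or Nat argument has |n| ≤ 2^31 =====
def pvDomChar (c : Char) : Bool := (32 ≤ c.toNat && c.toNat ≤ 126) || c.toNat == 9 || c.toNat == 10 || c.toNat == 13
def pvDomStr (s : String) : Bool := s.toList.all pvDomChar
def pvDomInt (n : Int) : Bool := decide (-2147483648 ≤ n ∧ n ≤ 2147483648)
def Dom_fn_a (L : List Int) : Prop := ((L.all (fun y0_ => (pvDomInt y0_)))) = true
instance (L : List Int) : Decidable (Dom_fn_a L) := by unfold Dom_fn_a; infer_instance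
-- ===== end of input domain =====

-- B builds the frequency dictionary once and sums counts of values exceeding their frequency (faster: one pass instead of a rescan per element).


-- ===== PORT A =====
def fn_a_helper (M : List Int) (m : Int) : Int :=
  M.foldl (fun n x => if x == m then n + 1 else n) 0

def fn_a (L : List Int) : Int :=
  ((L.filter (fun x => decide (fn_a_helper L x < x))).length : Int)

-- ===== PORT B =====
def fn_a_alt (L : List Int) : Int :=
  let counts : PySem.Dict Int Int :=
    L.foldl (fun d x => d.insert x (d.getD x 0 + 1)) PySem.Dict.empty
  ((counts.items.filter (fun q => decide (q.2 < q.1))).map Prod.snd).sum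

-- ===== PRECONDITION & SPEC =====
def Spec_fn_a (L : List Int) (out : Int) : Prop := out = fn_a_alt L
instance (L : List Int) (out : Int) : Decidable (Spec_fn_a L out) := by unfold Spec_fn_a; infer_instance

-- ===== CLAIM (what is proved, stated in full; the proofs are below) =====
def Claim_equal_fn_a : Prop := ∀ (L : List Int), Dom_fn_a L → Spec_fn_a L (fn_a L)

-- ===== LEMMAS AND PROOFS =====

-- every item of the counter pairs a value with its count in L
theorem item_snd_eq_count (L : List Int) (q : Int × Int)
    (hq : q ∈ (PySem.Dict.counter L).items) : q.2 = (L.count q.1 : Int) := by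
  have hnd := PySem.Dict.nodup_keys_counter L
  have h1 : (PySem.Dict.counter L).get? q.1 = some q.2 :=
    (PySem.Dict.get?_eq_some_iff_mem_items _ q.1 q.2 hnd).mpr (by simpa using hq)
  have h2 : (PySem.Dict.counter L).getD q.1 0 = (L.count q.1 : Int) :=
    PySem.Dict.getD_counter L q.1
  simp [PySem.Dict.getD, h1] at h2
  exact h2

-- pairs whose second component is f of the first: filtering on fst and projecting snd
theorem filter_map_snd {p : Int → Bool} {f : Int → Int} (l : List (Int × Int))
    (h : ∀ q ∈ l, q.2 = f q.1) :
    ((l.filter (fun q => p q.1)).map Prod.snd) = ((l.map Prod.fst).filter p).map f := by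
  induction l with
  | nil => simp
  | cons a t ih =>
    have ha := h a (by simp)
    have ih' := ih (fun q hq => h q (by simp [hq]))
    by_cases hp : p a.1 <;> simp [hp, ih', ha]

theorem sum_map_cast (f : Int → Nat) (l : List Int) :
    (l.map (fun k => ((f k : Nat) : Int))).sum = ((l.map f).sum : Int) := by
  induction l with
  | nil => simp
  | cons a t ih => simp [ih]

-- ===== VERDICT (by name: the statement is the Claim_ definition above) =====
theorem fn_a_spec : Claim_equal_fn_a := by
  intro L _
  unfold Spec_fn_a fn_a
  -- B's counting loop is definitionally PySem.Dict.counter L, so restate the goal with it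
  show _ = ((((PySem.Dict.counter L).items.filter (fun q => decide (q.2 < q.1))).map Prod.snd)).sum
  -- A side: helper = count, filter length = countP
  have hA : ((L.filter (fun x => decide (fn_a_helper L x < x))).length : Int)
      = ((L.countP (fun x => decide ((L.count x : Int) < x))) : Int) := by
    have : ∀ x ∈ L, (decide (fn_a_helper L x < x))
        = (decide ((L.count x : Int) < x)) := by
      intro x _
      have : fn_a_helper L x = (L.count x : Int) := by
        unfold fn_a_helper
        simpa using PySem.List.foldl_beq_add_one (l := L) (v := x) (a := 0)
      rw [this]
    rw [List.filter_congr this, List.countP_eq_length_filter]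
  rw [hA]
  -- B side: rewrite items filter/map into a sum over the key list
  set p : Int → Bool := fun k => decide ((L.count k : Int) < k) with hp
  have hfil : (PySem.Dict.counter L).items.filter (fun q => decide (q.2 < q.1))
      = (PySem.Dict.counter L).items.filter (fun q => p q.1) := by
    apply List.filter_congr
    intro q hq
    rw [item_snd_eq_count L q hq]
  rw [hfil, filter_map_snd (f := fun k => (L.count k : Int)) _ (fun q hq => item_snd_eq_count L q hq)]
  have hkeys : (PySem.Dict.counter L).items.map Prod.fst = PySem.Set.ofList L := by
    rw [← PySem.Dict.keys_counter L]; rfl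
  rw [hkeys]
  -- sum over Set.ofList L = sum over L.dedup  (both nodup, same members)
  have hperm : (PySem.Set.ofList L).Perm L.dedup := by
    rw [List.perm_ext_iff_of_nodup (PySem.Set.nodup_ofList L) L.nodup_dedup]
    intro a
    simp [PySem.Set.mem_ofList, List.mem_dedup]
  have hsum : (((PySem.Set.ofList L).filter p).map (fun k => (L.count k : Int))).sum
      = (((L.dedup.filter p).map (fun k => (L.count k : Int)))).sum :=
    ((hperm.filter p).map _).sum_eq
  rw [hsum, sum_map_cast (fun k => L.count k) (L.dedup.filter p)]
  rw [← List.sum_map_count_dedup_filter_eq_countP p L]
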